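-- pv_equiv track=rewrite | github.com/trung-hn/leetcode-solutions | src/825.friends-of-appropriate-ages.py | numFriendRequests
-- ===== SOURCE A (Python) =====
-- from typing import List
--
-- import collections
--
-- def numFriendRequests(ages: List[int]) -> int:
--     counter = collections.Counter(ages)
--     ans = 0
--     for age in ages:
--         upper_age = age
--         lower_age = age // 2 + 8
--         if upper_age < lower_age: continue
--         ans += sum(counter[a] for a in range(lower_age, upper_age + 1)) - 1
--     return ans
-- ===== SOURCE B (Python) =====
-- import collections
--
-- def numFriendRequests(ages):
--     cnt = collections.Counter(ages)
--     items = list(cnt.items())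
--     ans = 0
--     for x, c in items:
--         lo = x // 2 + 8
--         if x < lo:
--             continue
--         total = 0
--         for k, v in items:
--             if lo <= k <= x:
--                 total += v
--         ans += c * total - c
--     return ans
-- ===== Notes on version B (the rewrite author's own statement) =====
-- stated objective: faster
-- what changed: B drops A's per-element scan over every integer age in [age//2+8, age] and instead iterates only over the distinct ages (Counter items), weighting each distinct age's contribution by its multiplicity via a double loop over the distinct ages.
import Mathlib
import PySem

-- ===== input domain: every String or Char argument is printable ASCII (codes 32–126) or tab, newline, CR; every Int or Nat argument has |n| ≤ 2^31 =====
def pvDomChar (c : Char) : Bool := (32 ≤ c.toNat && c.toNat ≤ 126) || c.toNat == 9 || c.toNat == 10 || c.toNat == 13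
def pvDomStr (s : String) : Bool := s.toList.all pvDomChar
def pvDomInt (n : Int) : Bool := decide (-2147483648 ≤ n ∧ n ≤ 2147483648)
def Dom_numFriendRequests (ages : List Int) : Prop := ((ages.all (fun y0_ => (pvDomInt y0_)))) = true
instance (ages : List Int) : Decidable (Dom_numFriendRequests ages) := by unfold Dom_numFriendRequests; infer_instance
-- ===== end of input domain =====

-- B replaces A's per-element scan over the whole age range (O(n·maxAge)) by a double loop over the
-- distinct ages only, weighting each distinct age by its multiplicity (O(n + k²), k = #distinct ages).

-- ===== PORT A =====
def numFriendRequests (ages : List Int) : Int :=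
  let counter := PySem.Dict.counter ages
  ages.foldl (fun ans age =>
    let upper_age := age
    let lower_age := PySem.Int.floordiv age 2 + 8
    if upper_age < lower_age then ans
    else ans + (PySem.List.pyRange lower_age (upper_age + 1) 1).foldl
        (fun s a => s + counter.getD a 0) 0 - 1) 0

-- ===== PORT B =====
def numFriendRequests_alt (ages : List Int) : Int :=
  let cnt := PySem.Dict.counter ages
  let items := cnt.items
  items.foldl (fun ans xc =>
    let lo := PySem.Int.floordiv xc.1 2 + 8
    if xc.1 < lo then ans
    else
      let total := items.foldl (fun t kv => if lo ≤ kv.1 ∧ kv.1 ≤ xc.1 then t + kv.2 else t) 0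
      ans + xc.2 * total - xc.2) 0

-- ===== PRECONDITION & SPEC =====
def Spec_numFriendRequests (ages : List Int) (out : Int) : Prop := out = numFriendRequests_alt ages
instance (ages : List Int) (out : Int) : Decidable (Spec_numFriendRequests ages out) := by unfold Spec_numFriendRequests; infer_instance

-- ===== CLAIM (what is proved, stated in full; the proofs are below) =====
def Claim_equal_numFriendRequests : Prop := ∀ (ages : List Int), Dom_numFriendRequests ages → Spec_numFriendRequests ages (numFriendRequests ages)

-- ===== LEMMAS AND PROOFS =====

-- the per-age contribution both programs compute (0 if the age cannot send, else requests sent by one person of that age)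
def pvG (ages : List Int) (x : Int) : Int :=
  if x < PySem.Int.floordiv x 2 + 8 then 0
  else (ages.countP (fun y => decide (PySem.Int.floordiv x 2 + 8 ≤ y ∧ y ≤ x)) : Int) - 1

-- sum over a nodup list of an indicator-selected value picks the single matching element
lemma pv_sum_pick (L : List Int) (hL : L.Nodup) (f : Int → Int) (x : Int) :
    (L.map (fun k => if k = x then f k else 0)).sum = if x ∈ L then f x else 0 := by
  induction L with
  | nil => simp
  | cons a t ih =>
    obtain ⟨ha, ht⟩ := List.nodup_cons.mp hL
    by_cases hax : a = x
    · subst hax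
      have h0 : (t.map (fun k => if k = a then f k else 0)).sum = 0 := by
        rw [ih ht]; simp [ha]
      simp [h0]
    · have hxa : ¬ x = a := fun h => hax h.symm
      simp [hax, hxa, ih ht]

-- summing multiplicities over a range of values counts the in-range elements
lemma pv_range_count (ages : List Int) (lo hi : Int) :
    ((PySem.List.pyRange lo hi 1).map (fun a => (ages.count a : Int))).sum
      = (ages.countP (fun y => decide (lo ≤ y ∧ y < hi)) : Int) := by
  induction ages with
  | nil => simp
  | cons y t ih =>
    have hmap : (PySem.List.pyRange lo hi 1).map (fun a => (((y :: t).count a : Nat) : Int))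
        = (PySem.List.pyRange lo hi 1).map (fun a => ((t.count a : Int) + if a = y then 1 else 0)) := by
      apply List.map_congr_left
      intro a _
      by_cases h : a = y
      · simp [h]
      · have h' : ¬ y = a := fun hh => h hh.symm
        simp [h, h']
    rw [hmap, PySem.List.sum_map_add_int, ih,
        pv_sum_pick _ (PySem.List.nodup_pyRange_one lo hi) (fun _ => 1) y,
        List.countP_cons]
    by_cases hy : lo ≤ y ∧ y < hi
    · rw [if_pos (PySem.List.mem_pyRange_one.mpr hy)]
      simp [hy]
    · rw [if_neg (fun hmem => hy (PySem.List.mem_pyRange_one.mp hmem))]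
      simp [hy]

-- grouping: a sum over ages equals the multiplicity-weighted sum over any nodup superlist of its elements
lemma pv_group (ages L : List Int) (hL : L.Nodup) (hsub : ∀ y ∈ ages, y ∈ L) (g : Int → Int) :
    (ages.map g).sum = (L.map (fun k => (ages.count k : Int) * g k)).sum := by
  induction ages with
  | nil => simp
  | cons x t ih =>
    have hmap : L.map (fun k => (((x :: t).count k : Nat) : Int) * g k)
        = L.map (fun k => ((t.count k : Int) * g k) + (if k = x then g k else 0)) := by
      apply List.map_congr_left
      intro k _
      by_cases h : k = x
      · subst h
        simp
        ring
      · have h' : ¬ x = k := fun hh => h hh.symm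
        simp [h, h']
    rw [List.map_cons, List.sum_cons, hmap, PySem.List.sum_map_add_int,
        ← ih (fun y hy => hsub y (List.mem_cons_of_mem _ hy)),
        pv_sum_pick L hL g x, if_pos (hsub x List.mem_cons_self)]
    ring

-- A computes the multiset sum of per-age contributions
lemma pv_A_eq (ages : List Int) : numFriendRequests ages = (ages.map (pvG ages)).sum := by
  show List.foldl (fun ans age =>
      if age < PySem.Int.floordiv age 2 + 8 then ans
      else ans + List.foldl (fun s a => s + (PySem.Dict.counter ages).getD a 0) 0
          (PySem.List.pyRange (PySem.Int.floordiv age 2 + 8) (age + 1) 1) - 1) 0 ages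
    = (ages.map (pvG ages)).sum
  rw [PySem.List.foldl_congr_mem ages _ (fun ans age => ans + pvG ages age) 0 ?_]
  · rw [PySem.List.foldl_add]; ring
  · intro acc x _
    by_cases h : x < PySem.Int.floordiv x 2 + 8
    · rw [if_pos h]
      simp only [pvG, if_pos h]
      ring
    · rw [if_neg h]
      simp only [pvG, if_neg h]
      rw [PySem.List.foldl_add]
      have hg : (PySem.List.pyRange (PySem.Int.floordiv x 2 + 8) (x + 1) 1).map
            (fun a => (PySem.Dict.counter ages).getD a 0)
          = (PySem.List.pyRange (PySem.Int.floordiv x 2 + 8) (x + 1) 1).map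
            (fun a => (ages.count a : Int)) := by
        apply List.map_congr_left
        intro a _
        exact PySem.Dict.getD_counter ages a
      rw [hg, pv_range_count]
      have hp : ages.countP (fun y => decide (PySem.Int.floordiv x 2 + 8 ≤ y ∧ y < x + 1))
          = ages.countP (fun y => decide (PySem.Int.floordiv x 2 + 8 ≤ y ∧ y ≤ x)) := by
        apply List.countP_congr
        intro y _
        simp
      rw [hp]
      ring

-- B computes the multiplicity-weighted sum of the same contributions over the distinct ages
lemma pv_B_eq (ages : List Int) :
    numFriendRequests_alt ages
      = ((PySem.Set.ofList ages).map (fun k => (ages.count k : Int) * pvG ages k)).sum := by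
  show List.foldl (fun ans (xc : Int × Int) =>
      if xc.1 < PySem.Int.floordiv xc.1 2 + 8 then ans
      else ans + xc.2 * (List.foldl
          (fun t kv => if PySem.Int.floordiv xc.1 2 + 8 ≤ kv.1 ∧ kv.1 ≤ xc.1 then t + kv.2 else t) 0
          (PySem.Dict.counter ages).items) - xc.2)
      0 (PySem.Dict.counter ages).items
    = ((PySem.Set.ofList ages).map (fun k => (ages.count k : Int) * pvG ages k)).sum
  rw [PySem.Dict.items_counter, List.foldl_map]
  rw [PySem.List.foldl_congr_mem _ _
      (fun ans k => ans + (ages.count k : Int) * pvG ages k) 0 ?_]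
  · rw [PySem.List.foldl_add]; ring
  · intro acc k _
    show (if k < PySem.Int.floordiv k 2 + 8 then acc
        else acc + (ages.count k : Int) * (List.foldl
            (fun t kv => if PySem.Int.floordiv k 2 + 8 ≤ kv.1 ∧ kv.1 ≤ k then t + kv.2 else t) 0
            ((PySem.Set.ofList ages).map (fun k' => (k', (ages.count k' : Int))))) - (ages.count k : Int))
      = acc + (ages.count k : Int) * pvG ages k
    by_cases h : k < PySem.Int.floordiv k 2 + 8
    · rw [if_pos h]
      simp only [pvG, if_pos h]
      ring
    · rw [if_neg h]
      simp only [pvG, if_neg h]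
      rw [List.foldl_map]
      have hin : List.foldl
            (fun t k' => if PySem.Int.floordiv k 2 + 8 ≤ k' ∧ k' ≤ k then t + (ages.count k' : Int) else t) 0
            (PySem.Set.ofList ages)
          = ((PySem.Set.ofList ages).map
              (fun k' => if PySem.Int.floordiv k 2 + 8 ≤ k' ∧ k' ≤ k then (ages.count k' : Int) else 0)).sum := by
        rw [PySem.List.foldl_congr_mem _ _
            (fun t k' => t + if PySem.Int.floordiv k 2 + 8 ≤ k' ∧ k' ≤ k then (ages.count k' : Int) else 0) 0 ?_]
        · rw [PySem.List.foldl_add]; ring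
        · intro t k' _
          show _ = t + (if PySem.Int.floordiv k 2 + 8 ≤ k' ∧ k' ≤ k then (ages.count k' : Int) else 0)
          by_cases hk : PySem.Int.floordiv k 2 + 8 ≤ k' ∧ k' ≤ k
          · rw [if_pos hk, if_pos hk]
          · rw [if_neg hk, if_neg hk]
            ring
      have hsum : ((PySem.Set.ofList ages).map
            (fun k' => if PySem.Int.floordiv k 2 + 8 ≤ k' ∧ k' ≤ k then (ages.count k' : Int) else 0)).sum
          = (ages.countP (fun y => decide (PySem.Int.floordiv k 2 + 8 ≤ y ∧ y ≤ k)) : Int) := by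
        have hgrp := pv_group ages (PySem.Set.ofList ages) (PySem.Set.nodup_ofList ages)
          (fun y hy => (PySem.Set.mem_ofList ages y).mpr hy)
          (fun y => if PySem.Int.floordiv k 2 + 8 ≤ y ∧ y ≤ k then 1 else 0)
        have hL : (PySem.Set.ofList ages).map
              (fun k' => (ages.count k' : Int) *
                (if PySem.Int.floordiv k 2 + 8 ≤ k' ∧ k' ≤ k then (1:Int) else 0))
            = (PySem.Set.ofList ages).map
              (fun k' => if PySem.Int.floordiv k 2 + 8 ≤ k' ∧ k' ≤ k then (ages.count k' : Int) else 0) := by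
          apply List.map_congr_left
          intro k' _
          by_cases hk : PySem.Int.floordiv k 2 + 8 ≤ k' ∧ k' ≤ k
          · rw [if_pos hk, if_pos hk]
            ring
          · rw [if_neg hk, if_neg hk]
            ring
        have hcnt : (ages.map
              (fun y => if PySem.Int.floordiv k 2 + 8 ≤ y ∧ y ≤ k then (1:Int) else 0)).sum
            = (ages.countP (fun y => decide (PySem.Int.floordiv k 2 + 8 ≤ y ∧ y ≤ k)) : Int) := by
          have h01 := PySem.List.sum_map_ite_one_zero
            (fun y => decide (PySem.Int.floordiv k 2 + 8 ≤ y ∧ y ≤ k)) ages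
          simpa using h01
        rw [← hL, ← hgrp, hcnt]
      rw [hin, hsum]
      ring

-- ===== VERDICT (by name: the statement is the Claim_ definition above) =====
theorem numFriendRequests_spec : Claim_equal_numFriendRequests := by
  intro ages _
  unfold Spec_numFriendRequests
  rw [pv_A_eq, pv_B_eq,
      pv_group ages (PySem.Set.ofList ages) (PySem.Set.nodup_ofList ages)
        (fun y hy => (PySem.Set.mem_ofList ages y).mpr hy) (pvG ages)]
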